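-- pv_equiv track=rewrite | github.com/alessandropacielli/deepcomedy | nlgpoetry/utils.py | get_ngrams_from_tercets
-- ===== SOURCE A (Python) =====
-- def split_in_ngrams(x, n=3, pad_token='_'):
--     '''
--     Arguments:
--     'x' a string of text, e.g. a word a sentence.
--     'pad_token' the token to add to unfinished trigrams.
--
--     Returns:
--     a list containing 'x' split in trigrams.'''
--
--     trigrams = []
--     for i, ch in enumerate(x):
--         if i % n == 0:
--             trigrams.append('')
--
--         trigrams[-1] += ch
--
--     for p in range(3 - len(trigrams[-1])):
--         trigrams[-1] += pad_token
--
--     return trigrams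
--
-- def get_ngrams(l, n=3, pad_token='_'):
--     '''
--     Arguments:
--     'l' an input list of words.
--     'pad_token' the token to add to unfinished trigrams.
--
--     Returns:
--     a list of the trigrams of 'l'.'''
--     trigrams = []
--     for w in l:
--         t = split_in_ngrams(w, n, pad_token)
--         trigrams.extend(t)
--
--     return trigrams
--
-- def get_ngrams_from_tercets(tercets, n=3, pad_token='_'):
--     '''
--     Arguments:
--     'tercets' a list of tercets.
--     'pad_token' the token to add to unfinished trigrams.
--
--     Returns:
--     'tr_tercets' a list of tercets splitted in trigrams
--     'trigrams' a list of all the trigrams'''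
--     tr_tercets, trigrams = [], []
--     for tercet in tercets:
--         tr_tercets.append([])
--         for verse in tercet:
--             # t = split_in_ngrams(verse, pad_token) # CHANGE IN get_ngrams IF tercets are not raw
--             t = get_ngrams(verse, n, pad_token)
--             tr_tercets[-1].append(t)
--             trigrams.extend(t)
--
--     return tr_tercets, trigrams
-- ===== SOURCE B (Python) =====
-- def split_chunks(x, n=3, pad_token='_'):
--     chunks = [x[i:i + n] for i in range(0, len(x), n)]
--     chunks[-1] = chunks[-1] + pad_token * (3 - len(chunks[-1]))
--     return chunks
--
--
-- def get_ngrams_from_tercets(tercets, n=3, pad_token='_'):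
--     tr_tercets = [[[t for w in verse for t in split_chunks(w, n, pad_token)]
--                    for verse in tercet]
--                   for tercet in tercets]
--     trigrams = [t for tercet in tr_tercets for verse in tercet for t in verse]
--     return tr_tercets, trigrams
-- ===== Notes on version B (the rewrite author's own statement) =====
-- stated objective: idiomatic
-- what changed: split_in_ngrams's char-by-char enumerate accumulator is replaced by slice-based chunking (x[i:i+n] for i in range(0,len,n)) with the pad appended by string multiplication, and get_ngrams_from_tercets builds the nested structure purely with comprehensions and derives the flat trigram list by flattening it afterward instead of extending it inline during the loops.
-- outside the precondition, e.g. on get_ngrams_from_tercets([[['ab']]], -3, '_'): A returns ([[['ab_']]], ['ab_']), B raises IndexError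
import Mathlib
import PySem

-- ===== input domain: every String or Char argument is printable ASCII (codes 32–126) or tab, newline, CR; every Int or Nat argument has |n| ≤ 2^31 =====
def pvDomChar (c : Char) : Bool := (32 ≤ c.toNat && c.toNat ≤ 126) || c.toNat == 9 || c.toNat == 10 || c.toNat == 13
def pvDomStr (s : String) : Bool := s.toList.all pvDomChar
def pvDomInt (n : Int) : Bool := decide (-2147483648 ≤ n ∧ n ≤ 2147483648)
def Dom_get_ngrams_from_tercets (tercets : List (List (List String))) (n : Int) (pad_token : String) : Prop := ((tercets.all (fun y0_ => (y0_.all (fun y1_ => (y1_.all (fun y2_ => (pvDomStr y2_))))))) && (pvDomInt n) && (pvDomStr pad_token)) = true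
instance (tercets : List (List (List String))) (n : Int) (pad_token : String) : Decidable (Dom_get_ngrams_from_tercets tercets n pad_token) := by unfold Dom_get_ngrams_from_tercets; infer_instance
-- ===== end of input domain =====

-- B re-implements the tercet n-gram splitter idiomatically: slice-based chunking plus string
-- multiplication for the pad, building the nested structure with maps and flattening it afterward
-- instead of A's char-by-char enumerate accumulator with inline extends (objective: idiomatic).


-- ===== PORT A =====
-- Strings are handled on the List Char side throughout (PySem convention).
-- one loop step of A's 'for i, ch in enumerate(x)' body
def pvStepA (n : Int) (tr : List (List Char)) (p : Int × Char) : List (List Char) :=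
  let tr := if PySem.Int.mod p.1 n == 0 then tr ++ [[]] else tr
  -- trigrams[-1] += ch  (on the raising path — empty list — getLastD's default is irrelevant: outside Pre_)
  tr.dropLast ++ [tr.getLastD [] ++ [p.2]]

def split_in_ngrams (x : String) (n : Int) (pad_token : String) : List String :=
  let trigrams := (PySem.List.enumerate x.toList).foldl (pvStepA n) []
  -- for p in range(3 - len(trigrams[-1])): trigrams[-1] += pad_token
  let trigrams := (PySem.List.pyRange 0 ((3 : Int) - ((trigrams.getLastD []).length : Int)) 1).foldl
      (fun tr _ => tr.dropLast ++ [tr.getLastD [] ++ pad_token.toList]) trigrams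
  trigrams.map (fun cs => String.ofList cs)

def get_ngrams (l : List String) (n : Int) (pad_token : String) : List String :=
  l.foldl (fun trigrams w => trigrams ++ split_in_ngrams w n pad_token) []

def get_ngrams_from_tercets (tercets : List (List (List String))) (n : Int) (pad_token : String) : List (List (List String)) × List String :=
  tercets.foldl (fun (st : List (List (List String)) × List String) tercet =>
    let st := (st.1 ++ [[]], st.2)
    tercet.foldl (fun (st : List (List (List String)) × List String) verse =>
      let t := get_ngrams verse n pad_token
      (st.1.dropLast ++ [st.1.getLastD [] ++ [t]], st.2 ++ t)) st) ([], [])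

-- ===== PORT B =====
def split_chunks (x : String) (n : Int) (pad_token : String) : List String :=
  let L := x.toList
  -- chunks = [x[i:i+n] for i in range(0, len(x), n)]
  let chunks := (PySem.List.pyRange 0 (L.length : Int) n).map
      (fun i => PySem.List.slice L (some i) (some (i + n)))
  -- chunks[-1] = chunks[-1] + pad_token * (3 - len(chunks[-1]))
  let chunks := chunks.dropLast ++
      [chunks.getLastD [] ++ PySem.List.pyRepeat pad_token.toList ((3 : Int) - ((chunks.getLastD []).length : Int))]
  chunks.map (fun cs => String.ofList cs)

def get_ngrams_from_tercets_alt (tercets : List (List (List String))) (n : Int) (pad_token : String) : List (List (List String)) × List String :=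
  let tr_tercets := tercets.map (fun tercet =>
    tercet.map (fun verse => verse.flatMap (fun w => split_chunks w n pad_token)))
  (tr_tercets, tr_tercets.flatMap (fun tercet => tercet.flatMap (fun verse => verse)))

-- ===== PRECONDITION & SPEC =====
-- Pre_ excludes non-positive n and empty words (unless there are no words at all): there A either
-- raises (ZeroDivisionError for n = 0, IndexError for an empty word) or, for negative n, returns a
-- value that B's slicing cannot produce (B raises IndexError there).
def Pre_get_ngrams_from_tercets (tercets : List (List (List String))) (n : Int) (pad_token : String) : Prop :=
  (1 ≤ n ∧ ∀ t ∈ tercets, ∀ v ∈ t, ∀ w ∈ v, w ≠ "") ∨ (∀ t ∈ tercets, ∀ v ∈ t, v = [])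
instance (tercets : List (List (List String))) (n : Int) (pad_token : String) : Decidable (Pre_get_ngrams_from_tercets tercets n pad_token) := by unfold Pre_get_ngrams_from_tercets; infer_instance

def pvWitness_get_ngrams_from_tercets : List (List (List String)) × Int × String :=
  ([[["hello", "ab"], ["x"]], [["abcd"]]], 3, "_")

def Spec_get_ngrams_from_tercets (tercets : List (List (List String))) (n : Int) (pad_token : String) (out : List (List (List String)) × List String) : Prop := out = get_ngrams_from_tercets_alt tercets n pad_token
instance (tercets : List (List (List String))) (n : Int) (pad_token : String) (out : List (List (List String)) × List String) : Decidable (Spec_get_ngrams_from_tercets tercets n pad_token out) := by unfold Spec_get_ngrams_from_tercets; infer_instance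

-- ===== CLAIM (what is proved, stated in full; the proofs are below) =====
def Claim_equal_get_ngrams_from_tercets : Prop := ∀ (tercets : List (List (List String))) (n : Int) (pad_token : String), Dom_get_ngrams_from_tercets tercets n pad_token → Pre_get_ngrams_from_tercets tercets n pad_token → Spec_get_ngrams_from_tercets tercets n pad_token (get_ngrams_from_tercets tercets n pad_token)

-- ===== LEMMAS AND PROOFS =====

-- the common chunking specification: x split into blocks of m chars, last block possibly short
def chunkS (m : Nat) (l : List Char) : List (List Char) :=
  match l with
  | [] => []
  | c :: t => (c :: t.take (m - 1)) :: chunkS m (t.drop (m - 1))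
termination_by l.length
decreasing_by simp

theorem chunkS_nil (m : Nat) : chunkS m [] = [] := by rw [chunkS]
theorem chunkS_cons (m : Nat) (c : Char) (t : List Char) :
    chunkS m (c :: t) = (c :: t.take (m - 1)) :: chunkS m (t.drop (m - 1)) := by rw [chunkS]

-- A's accumulator loop with cur = current partial chunk, r = free slots left in it
def chunkC (m : Nat) (cur : List Char) (r : Nat) (l : List Char) : List (List Char) :=
  match r, l with
  | _, [] => [cur]
  | 0, c :: t => cur :: chunkC m [c] (m - 1) t
  | r + 1, c :: t => chunkC m (cur ++ [c]) r t
termination_by l.length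

-- (i+1) % n from i % n, used to track A's boundary test along the loop
theorem emod_succ (n i v : Int) (h : i % n = v) : (i + 1) % n = (v + 1) % n := by
  conv_lhs => rw [← Int.emod_add_mul_ediv i n]
  rw [h, show v + n * (i / n) + 1 = v + 1 + n * (i / n) from by ring, Int.add_mul_emod_self_left]

theorem foldl_stepA (n : Int) (hn : 1 ≤ n) :
    ∀ (l : List Char) (i0 : Int) (acc : List (List Char)) (cur : List Char) (r : Nat),
    0 ≤ i0 → r < n.toNat → i0 % n = (n - (r : Int)) % n →
    (PySem.List.enumerate l i0).foldl (pvStepA n) (acc ++ [cur]) = acc ++ chunkC n.toNat cur r l := by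
  intro l
  induction l with
  | nil => intro i0 acc cur r _ _ _; simp [PySem.List.enumerate_nil, chunkC]
  | cons c t ih =>
    intro i0 acc cur r hi0 hr hmod
    have hnn : 0 < n := by omega
    rw [PySem.List.enumerate_cons, List.foldl_cons]
    rcases r with _ | r'
    · -- boundary: i % n == 0, new chunk started
      have h0 : i0 % n = 0 := by
        rw [hmod, show n - ((0 : Nat) : Int) = n from by omega, Int.emod_self]
      have hstep : pvStepA n (acc ++ [cur]) (i0, c) = (acc ++ [cur]) ++ [[c]] := by
        simp [pvStepA, PySem.Int.mod_eq_emod_of_pos hnn, h0]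
      rw [hstep]
      rw [ih (i0 + 1) (acc ++ [cur]) [c] (n.toNat - 1) (by omega) (by omega)
          (by rw [emod_succ n i0 0 h0]; congr 1; omega)]
      simp [chunkC]
    · -- mid-chunk: i % n ≠ 0, append to current chunk
      have hval : (n - ((r' + 1 : Nat) : Int)) % n = n - (((r' : Int)) + 1) := by
        rw [Int.emod_eq_of_lt (by omega) (by omega)]; push_cast; ring
      have hmod' : i0 % n = n - (((r' : Int)) + 1) := by rw [hmod, hval]
      have h0 : i0 % n ≠ 0 := by omega
      have hstep : pvStepA n (acc ++ [cur]) (i0, c) = acc ++ [cur ++ [c]] := by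
        simp only [pvStepA, PySem.Int.mod_eq_emod_of_pos hnn]
        rw [if_neg (by simpa using h0)]
        simp
      rw [hstep]
      rw [ih (i0 + 1) acc (cur ++ [c]) r' (by omega) (by omega)
          (by rw [emod_succ n i0 _ hmod']; congr 1; ring)]
      simp [chunkC]

theorem chunkC_eq_chunkS (m : Nat) (_hm : 1 ≤ m) :
    ∀ (l : List Char) (cur : List Char) (r : Nat), r ≤ m - 1 →
    chunkC m cur r l = (cur ++ l.take r) :: chunkS m (l.drop r) := by
  intro l
  induction l with
  | nil => intro cur r _; simp [chunkC, chunkS_nil]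
  | cons c t ih =>
    intro cur r hr
    rcases r with _ | r'
    · simp only [chunkC, List.take_zero, List.drop_zero, List.append_nil]
      rw [ih [c] (m - 1) (by omega), chunkS_cons]
      simp
    · simp only [chunkC]
      rw [ih (cur ++ [c]) r' (by omega)]
      simp [List.take_succ_cons, List.drop_succ_cons]

-- A's main loop computes chunkS
theorem loopA_eq_chunkS (n : Int) (hn : 1 ≤ n) (l : List Char) (hl : l ≠ []) :
    (PySem.List.enumerate l 0).foldl (pvStepA n) [] = chunkS n.toNat l := by
  rcases l with _ | ⟨c, t⟩
  · simp at hl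
  · rw [PySem.List.enumerate_cons, List.foldl_cons]
    have hstep : pvStepA n [] (0, c) = [] ++ [[c]] := by
      simp [pvStepA, PySem.Int.mod_eq_emod_of_pos (by omega : (0:Int) < n)]
    rw [hstep]
    simp only [zero_add]
    rw [foldl_stepA n hn t 1 [] [c] (n.toNat - 1) (by omega) (by omega)
        (by rw [show ((n.toNat - 1 : Nat) : Int) = n - 1 from by omega,
              show n - (n - 1) = 1 from by ring])]
    rw [chunkC_eq_chunkS n.toNat (by omega) t [c] (n.toNat - 1) (by omega), chunkS_cons]
    simp

-- pyRange with positive step: cons and shift forms (specific helpers for B's loop)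
theorem pyRange_pos_cons (a b s : Int) (hs : 0 < s) (hab : a < b) :
    PySem.List.pyRange a b s = a :: PySem.List.pyRange (a + s) b s := by
  rw [PySem.List.pyRange_of_pos _ _ hs, PySem.List.pyRange_of_pos _ _ hs, if_pos hab]
  by_cases h2 : a + s < b
  · rw [if_pos h2]
    have hc2 : (0 : Int) ≤ (b - (a + s) + s - 1) / s := Int.ediv_nonneg (by omega) (by omega)
    have hcount : (b - a + s - 1) / s = (b - (a + s) + s - 1) / s + 1 := by
      have h3 : b - a + s - 1 = (b - (a + s) + s - 1) + 1 * s := by ring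
      rw [h3, Int.add_mul_ediv_right _ _ (by omega)]
    rw [hcount, show ((b - (a + s) + s - 1) / s + 1).toNat
        = ((b - (a + s) + s - 1) / s).toNat + 1 from by omega, List.range_succ_eq_map]
    simp only [List.map_cons, List.map_map]
    congr 1
    · simp
    · apply List.map_congr_left
      intro k _
      simp only [Function.comp_apply, Nat.succ_eq_add_one]
      push_cast
      ring
  · rw [if_neg h2]
    have hcount : (b - a + s - 1) / s = 1 := by
      have h3 : b - a + s - 1 = (b - a - 1) + 1 * s := by ring
      rw [h3, Int.add_mul_ediv_right _ _ (by omega),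
        Int.ediv_eq_zero_of_lt (by omega) (by omega)]
      norm_num
    rw [hcount]
    simp

theorem pyRange_pos_shift (a b s : Int) (hs : 0 < s) :
    PySem.List.pyRange a b s = (PySem.List.pyRange 0 (b - a) s).map (fun i => i + a) := by
  rw [PySem.List.pyRange_of_pos _ _ hs, PySem.List.pyRange_of_pos _ _ hs]
  by_cases h : a < b
  · rw [if_pos h, if_pos (by omega : (0:Int) < b - a),
      show b - a - 0 + s - 1 = b - a + s - 1 from by ring, List.map_map]
    apply List.map_congr_left
    intro k _
    simp [Function.comp]
    ring
  · rw [if_neg h, if_neg (by omega)]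
    simp

-- B's slicing comprehension computes chunkS
theorem sliceMap_eq_chunkS (n : Int) (hn : 1 ≤ n) :
    ∀ (L : List Char),
    (PySem.List.pyRange 0 (L.length : Int) n).map
      (fun i => PySem.List.slice L (some i) (some (i + n))) = chunkS n.toNat L := by
  intro L
  induction hL : L.length using Nat.strong_induction_on generalizing L with
  | _ len ih =>
  subst hL
  rcases L with _ | ⟨c, t⟩
  · simp only [List.length_nil, Nat.cast_zero]
    rw [PySem.List.pyRange_of_pos _ _ (by omega : (0:Int) < n)]
    norm_num [chunkS_nil]
  · have hlen : (0 : Int) < ((c :: t).length : Int) := by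
      simp only [List.length_cons]
      push_cast
      omega
    rw [pyRange_pos_cons _ _ _ (by omega) hlen, List.map_cons]
    have hhead : PySem.List.slice (c :: t) (some 0) (some (0 + n)) = c :: t.take (n.toNat - 1) := by
      rw [PySem.List.slice_toNat _ (by omega) (by omega)]
      simp only [Int.toNat_zero, List.drop_zero, Nat.sub_zero]
      rw [show (0 + n).toNat = (n.toNat - 1) + 1 from by omega]
      simp [List.take_succ_cons]
    have htail :
        (PySem.List.pyRange (0 + n) ((c :: t).length : Int) n).map
          (fun i => PySem.List.slice (c :: t) (some i) (some (i + n)))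
        = chunkS n.toNat (t.drop (n.toNat - 1)) := by
      rw [pyRange_pos_shift _ _ _ (by omega), List.map_map]
      set L' := t.drop (n.toNat - 1) with hL'
      by_cases h : n ≤ ((c :: t).length : Int)
      · have hlen' : (((c :: t).length : Int) - (0 + n)) = (L'.length : Int) := by
          have h1 : L'.length = (c :: t).length - n.toNat := by
            simp only [hL', List.length_drop, List.length_cons]
            omega
          rw [h1]
          simp only [List.length_cons] at h ⊢
          push_cast at h ⊢
          omega
        rw [hlen']
        rw [← ih L'.length (by
            simp only [hL', List.length_drop, List.length_cons] at *
            omega) L' rfl]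
        apply List.map_congr_left
        intro i hi
        have hi0 : 0 ≤ i := by
          rcases (PySem.List.mem_pyRange_iff_of_pos (by omega) i).mp hi with ⟨h1, _, _⟩
          exact h1
        simp only [Function.comp_apply]
        rw [PySem.List.slice_toNat _ (by omega) (by omega),
          PySem.List.slice_toNat _ (by omega) (by omega)]
        have hdrop : (c :: t).drop (i + (0 + n)).toNat = L'.drop i.toNat := by
          rw [show (i + (0 + n)).toNat = ((n.toNat - 1) + i.toNat) + 1 from by omega]
          simp only [List.drop_succ_cons, hL', List.drop_drop]
        rw [hdrop]
        congr 1
        omega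
      · have hL'nil : L' = [] := by
          rw [hL', List.drop_eq_nil_iff]
          simp only [List.length_cons] at h ⊢
          push_cast at h
          omega
        rw [PySem.List.pyRange_of_pos _ _ (by omega : (0:Int) < n),
          if_neg (by omega)]
        simp [hL'nil, chunkS_nil]
    rw [htail, hhead, chunkS_cons]

-- the pad loop appends one copy of pad per iteration; the loop body ignores the range element
theorem foldl_pad (padL : List Char) :
    ∀ (l : List Int) (acc : List (List Char)) (last : List Char),
    l.foldl (fun tr _ => tr.dropLast ++ [tr.getLastD [] ++ padL]) (acc ++ [last])
      = acc ++ [last ++ (List.replicate l.length padL).flatten] := by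
  intro l
  induction l with
  | nil => intro acc last; simp
  | cons hd tl ih =>
    intro acc last
    rw [List.foldl_cons, List.dropLast_concat, List.getLastD_concat, ih]
    simp [List.replicate_succ]

-- the word-level equivalence: for a nonempty word and n ≥ 1 the two splitters agree
theorem split_eq (x : String) (n : Int) (pad_token : String) (hn : 1 ≤ n) (hx : x ≠ "") :
    split_in_ngrams x n pad_token = split_chunks x n pad_token := by
  have hxl : x.toList ≠ [] := fun h => hx (String.toList_eq_nil_iff.mp h)
  simp only [split_in_ngrams, split_chunks]
  rw [loopA_eq_chunkS n hn x.toList hxl, sliceMap_eq_chunkS n hn x.toList]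
  have hne : chunkS n.toNat x.toList ≠ [] := by
    rcases hl : x.toList with _ | ⟨c, t⟩
    · exact absurd hl hxl
    · rw [chunkS_cons]; simp
  rcases List.eq_nil_or_concat (chunkS n.toNat x.toList) with h | ⟨acc, last, h⟩
  · exact absurd h hne
  · rw [List.concat_eq_append] at h
    rw [h, List.getLastD_concat, foldl_pad, List.dropLast_concat,
      show (PySem.List.pyRange 0 ((3 : Int) - ((last.length : Nat) : Int)) 1).length
          = ((3 : Int) - ((last.length : Nat) : Int)).toNat from by
        simp [PySem.List.length_pyRange_one]]
    simp [PySem.List.pyRepeat]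

-- verse level: A's extend loop is B's flatMap (both trivial for an empty verse)
theorem verse_eq (verse : List String) (n : Int) (pad_token : String)
    (h : (1 ≤ n ∧ ∀ w ∈ verse, w ≠ "") ∨ verse = []) :
    get_ngrams verse n pad_token = verse.flatMap (fun w => split_chunks w n pad_token) := by
  unfold get_ngrams
  rw [PySem.List.foldl_append_eq_flatMap]
  rcases h with ⟨hn, hw⟩ | h
  · simp only [List.nil_append]
    apply List.flatMap_congr
    intro w hwmem
    exact split_eq w n pad_token hn (hw w hwmem)
  · subst h; simp

-- A's inner loop over one tercet
theorem tercet_loop (n : Int) (pad_token : String) :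
    ∀ (tercet : List (List String)) (acc : List (List (List String))) (cur : List (List String)) (tri : List String),
    tercet.foldl (fun (st : List (List (List String)) × List String) verse =>
      (st.1.dropLast ++ [st.1.getLastD [] ++ [get_ngrams verse n pad_token]],
       st.2 ++ get_ngrams verse n pad_token)) (acc ++ [cur], tri)
    = (acc ++ [cur ++ tercet.map (fun verse => get_ngrams verse n pad_token)],
       tri ++ tercet.flatMap (fun verse => get_ngrams verse n pad_token)) := by
  intro tercet
  induction tercet with
  | nil => intro acc cur tri; simp
  | cons v rest ih =>
    intro acc cur tri
    rw [List.foldl_cons]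
    simp only [List.dropLast_concat, List.getLastD_concat]
    rw [ih acc (cur ++ [get_ngrams v n pad_token]) (tri ++ get_ngrams v n pad_token)]
    simp

-- A's outer loop over the tercets
theorem outer_loop (n : Int) (pad_token : String) :
    ∀ (tercets : List (List (List String))) (acc1 : List (List (List String))) (acc2 : List String),
    tercets.foldl (fun (st : List (List (List String)) × List String) tercet =>
      tercet.foldl (fun (st : List (List (List String)) × List String) verse =>
        (st.1.dropLast ++ [st.1.getLastD [] ++ [get_ngrams verse n pad_token]],
         st.2 ++ get_ngrams verse n pad_token)) (st.1 ++ [[]], st.2)) (acc1, acc2)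
    = (acc1 ++ tercets.map (fun tercet => tercet.map (fun verse => get_ngrams verse n pad_token)),
       acc2 ++ tercets.flatMap (fun tercet => tercet.flatMap (fun verse => get_ngrams verse n pad_token))) := by
  intro tercets
  induction tercets with
  | nil => intro acc1 acc2; simp
  | cons tc rest ih =>
    intro acc1 acc2
    rw [List.foldl_cons]
    simp only
    rw [tercet_loop n pad_token tc acc1 [] acc2, ih]
    simp

-- ===== VERDICT (by name: the statement is the Claim_ definition above) =====
theorem get_ngrams_from_tercets_spec : Claim_equal_get_ngrams_from_tercets := by
  unfold Claim_equal_get_ngrams_from_tercets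
  intro tercets n pad_token _ hpre
  unfold Spec_get_ngrams_from_tercets
  simp only [get_ngrams_from_tercets, get_ngrams_from_tercets_alt]
  rw [outer_loop n pad_token tercets [] []]
  have hverse : ∀ t ∈ tercets, ∀ v ∈ t,
      get_ngrams v n pad_token = v.flatMap (fun w => split_chunks w n pad_token) := by
    intro t ht v hv
    apply verse_eq
    rcases hpre with ⟨hn, hw⟩ | hemp
    · exact Or.inl ⟨hn, hw t ht v hv⟩
    · exact Or.inr (hemp t ht v hv)
  have hmap : tercets.map (fun tercet => tercet.map (fun verse => get_ngrams verse n pad_token))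
      = tercets.map (fun tercet => tercet.map (fun verse => verse.flatMap (fun w => split_chunks w n pad_token))) := by
    apply List.map_congr_left
    intro t ht
    apply List.map_congr_left
    intro v hv
    exact hverse t ht v hv
  simp only [List.nil_append, Prod.mk.injEq]
  constructor
  · exact hmap
  · rw [List.flatMap_map]
    apply List.flatMap_congr
    intro t ht
    rw [List.flatMap_map]
    apply List.flatMap_congr
    intro v hv
    exact hverse t ht v hv
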